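-- pv_equiv track=rewrite | github.com/nhdandz/textsum2022 | test_keyword_filter.py | get_raw_text_by_topic
-- ===== SOURCE A (Python) =====
-- def get_raw_text_by_topic(topics, raw_text):
--     """
--     Copy từ helper_multi.py để test
--     """
--     def removeDuplicates(lst):
--         return list(set([i for i in lst]))
--
--     list_pragrab = raw_text.split('\n')
--     list_raw = []
--     topic_choose = topics[0]
--     topic_not = topics[1]
--
--     # AND Logic
--     if len(topic_choose) != 0:
--         for key_words in topic_choose:
--             key_word = key_words.split(',')
--             for pragrab in list_pragrab:
--                 is_choose = True
--                 for word in key_word: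
--                     if word.lower() not in pragrab.lower():
--                         is_choose = False
--                 if is_choose == True:
--                     index = list_pragrab.index(pragrab)
--                     list_raw.append((index, pragrab))
--     else:
--         count = 0
--         for pragrab in list_pragrab:
--             list_raw.append((count, pragrab))
--             count += 1
--
--     list_raw = removeDuplicates(list_raw)
--     list_raw_process = sorted(list_raw, key=lambda tup: tup[0])
--
--     # NOT Logic
--     list_raw_final = []
--     if len(topic_not) != 0:
--         for key_words in topic_not:
--             key_word = key_words.split(',')
--             for pragrab in list_raw_process:
--                 is_choose = True
--                 for word in key_word:
--                     if ' ' + word.strip().lower() + ' ' in pragrab[1].lower():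
--                         is_choose = False
--                 if is_choose == True:
--                     list_raw_final.append(pragrab)
--     else:
--         list_raw_final = list_raw_process
--
--     list_raw_final = removeDuplicates(list_raw_final)
--     list_raw_final_process = sorted(list_raw_final, key=lambda tup: tup[0])
--
--     list_text_topic = []
--     for text_topic in list_raw_final_process:
--         list_text_topic.append(text_topic[1])
--
--     return '\n'.join(list_text_topic)
-- ===== SOURCE B (Python) =====
-- def get_raw_text_by_topic(topics, raw_text):
--     topic_choose = topics[0]
--     topic_not = topics[1]
--     paragraphs = raw_text.split('\n')
--
--     if topic_choose:
--         # single ordered pass; dedup (first occurrence) only in this branch,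
--         # matching the original's index/set/sort pipeline
--         seen = set()
--         selected = []
--         for p in paragraphs:
--             if p in seen:
--                 continue
--             if any(all(w.lower() in p.lower() for w in g.split(',')) for g in topic_choose):
--                 seen.add(p)
--                 selected.append(p)
--     else:
--         selected = list(paragraphs)
--
--     if topic_not:
--         selected = [p for p in selected
--                     if any(all((' ' + w.strip().lower() + ' ') not in p.lower()
--                                for w in g.split(',')) for g in topic_not)]
--
--     return '\n'.join(selected)
-- ===== Notes on version B (the rewrite author's own statement) =====
-- stated objective: simpler
-- what changed: Replaces A's per-group rescans with (index,text) tuples, list.index calls, two set-dedups and two sorts by a single ordered pass with a seen-set plus one filter over the kept paragraphs.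
import Mathlib
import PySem

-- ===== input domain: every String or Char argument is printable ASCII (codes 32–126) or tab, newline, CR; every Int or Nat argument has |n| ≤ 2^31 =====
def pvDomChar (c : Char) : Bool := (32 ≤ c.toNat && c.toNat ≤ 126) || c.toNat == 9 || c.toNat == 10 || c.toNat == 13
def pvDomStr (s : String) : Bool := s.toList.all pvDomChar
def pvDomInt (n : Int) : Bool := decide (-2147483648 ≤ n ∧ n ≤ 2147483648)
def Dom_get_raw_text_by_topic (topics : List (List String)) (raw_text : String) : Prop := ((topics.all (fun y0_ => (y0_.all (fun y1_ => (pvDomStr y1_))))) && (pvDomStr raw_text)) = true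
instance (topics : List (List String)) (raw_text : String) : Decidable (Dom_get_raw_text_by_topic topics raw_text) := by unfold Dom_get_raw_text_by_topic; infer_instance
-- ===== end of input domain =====

-- B replaces A's per-group rescans, (index,text) tuples, list.index calls, set-dedups and
-- two sorts by one ordered pass with a seen-set plus one filter; return values proved equal.

-- s.split(sep) with non-empty literal sep, used by both ports ('\n' and ',')
def pvSplit (s sep : String) : List String := (PySem.Str.split? s sep).getD []

-- shared leaf predicates: the identical Python subexpressions appearing verbatim in BOTH sources
-- 'word.lower() in pragrab.lower()'
def pvWordIn (w p : String) : Bool := PySem.Str.isIn (PySem.Str.lower w) (PySem.Str.lower p)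
-- "' ' + word.strip().lower() + ' ' in pragrab.lower()"  (built on the Chars side: exact)
def pvPadIn (w p : String) : Bool :=
  PySem.Chars.isIn ((' ' :: PySem.Chars.lower (PySem.Chars.strip w.toList)) ++ [' ']) (PySem.Chars.lower p.toList)

-- ===== PORT A =====
-- the inner 'for word in key_word: if …: is_choose = False' flag loops
def pvA_andFlag (key_word : List String) (pragrab : String) : Bool :=
  key_word.foldl (fun b word => if pvWordIn word pragrab then b else false) true
def pvA_notFlag (key_word : List String) (pragrab : String) : Bool :=
  key_word.foldl (fun b word => if pvPadIn word pragrab then false else b) true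

def get_raw_text_by_topic (topics : List (List String)) (raw_text : String) : String :=
  match PySem.List.pyGet? topics 0, PySem.List.pyGet? topics 1 with
  | some topic_choose, some topic_not =>
    let list_pragrab := pvSplit raw_text "\n"
    -- AND logic
    let list_raw : List (Nat × String) :=
      if topic_choose.length ≠ 0 then
        topic_choose.foldl (fun acc key_words =>
          let key_word := pvSplit key_words ","
          list_pragrab.foldl (fun acc2 pragrab =>
            if pvA_andFlag key_word pragrab then
              acc2 ++ [((PySem.List.index? list_pragrab pragrab).getD 0, pragrab)]
            else acc2) acc) []
      else
        (list_pragrab.foldl (fun (st : List (Nat × String) × Nat) pragrab =>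
          (st.1 ++ [(st.2, pragrab)], st.2 + 1)) ([], 0)).1
    let list_raw_process := PySem.List.sorted (PySem.Set.ofList list_raw) (fun t => t.1)
    -- NOT logic
    let list_raw_final : List (Nat × String) :=
      if topic_not.length ≠ 0 then
        topic_not.foldl (fun acc key_words =>
          let key_word := pvSplit key_words ","
          list_raw_process.foldl (fun acc2 pragrab =>
            if pvA_notFlag key_word pragrab.2 then acc2 ++ [pragrab] else acc2) acc) []
      else list_raw_process
    let list_raw_final_process := PySem.List.sorted (PySem.Set.ofList list_raw_final) (fun t => t.1)
    PySem.Str.join "\n" (list_raw_final_process.foldl (fun acc t => acc ++ [t.2]) [])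
  | _, _ => ""   -- unreached under Pre_ (topics[0] / topics[1] raise IndexError)

-- ===== PORT B =====
def pvB_group (g p : String) : Bool := (pvSplit g ",").all (fun w => pvWordIn w p)
def pvB_choose (topic_choose : List String) (p : String) : Bool := topic_choose.any (fun g => pvB_group g p)
def pvB_notKeep (topic_not : List String) (p : String) : Bool :=
  topic_not.any (fun g => (pvSplit g ",").all (fun w => !pvPadIn w p))

def get_raw_text_by_topic_alt (topics : List (List String)) (raw_text : String) : String :=
  (((PySem.List.pyGet? topics 0).bind (fun topic_choose =>
    (PySem.List.pyGet? topics 1).map (fun topic_not =>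
      let paragraphs := pvSplit raw_text "\n"
      let selected : List String :=
        if topic_choose ≠ [] then
          (paragraphs.foldl (fun (st : PySem.Set String × List String) p =>
            if PySem.Set.contains st.1 p then st
            else if pvB_choose topic_choose p then (PySem.Set.add st.1 p, st.2 ++ [p]) else st)
            (PySem.Set.empty, [])).2
        else paragraphs
      let kept := if topic_not ≠ [] then selected.filter (fun p => pvB_notKeep topic_not p) else selected
      PySem.Str.join "\n" kept))) : Option String).getD ""

-- ===== PRECONDITION & SPEC =====
-- A raises IndexError (topics[0] / topics[1]) when topics has fewer than two entries; nothing else raises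
def Pre_get_raw_text_by_topic (topics : List (List String)) (raw_text : String) : Prop :=
  2 ≤ topics.length
instance (topics : List (List String)) (raw_text : String) : Decidable (Pre_get_raw_text_by_topic topics raw_text) := by unfold Pre_get_raw_text_by_topic; infer_instance
def pvWitness_get_raw_text_by_topic : List (List String) × String :=
  ([["cat"], ["dog"]], "a cat x\ncat dog y\nno match")

def Spec_get_raw_text_by_topic (topics : List (List String)) (raw_text : String) (out : String) : Prop := out = get_raw_text_by_topic_alt topics raw_text
instance (topics : List (List String)) (raw_text : String) (out : String) : Decidable (Spec_get_raw_text_by_topic topics raw_text out) := by unfold Spec_get_raw_text_by_topic; infer_instance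

-- ===== CLAIM (what is proved, stated in full; the proofs are below) =====
def Claim_equal_get_raw_text_by_topic : Prop := ∀ (topics : List (List String)) (raw_text : String), Dom_get_raw_text_by_topic topics raw_text → Pre_get_raw_text_by_topic topics raw_text → Spec_get_raw_text_by_topic topics raw_text (get_raw_text_by_topic topics raw_text)

-- ===== LEMMAS AND PROOFS =====

-- B's single selection pass, as a recursive function (proof-side only)
def pvSel (tc : List String) (s : List String) : List String → List String
  | [] => []
  | p :: L => if p ∈ s then pvSel tc s L
              else if pvB_choose tc p then p :: pvSel tc (s ++ [p]) L
              else pvSel tc s L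

-- the inner flag folds of A are B's all-quantifiers
theorem pvFoldFlagAnd (c : String → Bool) : ∀ (kw : List String) (b : Bool),
    kw.foldl (fun b w => if c w then b else false) b = (b && kw.all c) := by
  intro kw
  induction kw with
  | nil => simp
  | cons w kw ih =>
    intro b
    have hstep : (if c w = true then b else false) = (b && c w) := by
      cases hc : c w <;> simp
    rw [List.foldl_cons, hstep, ih, List.all_cons, Bool.and_assoc]

theorem pvFoldFlagNot (c : String → Bool) : ∀ (kw : List String) (b : Bool),
    kw.foldl (fun b w => if c w then false else b) b = (b && kw.all (fun w => !c w)) := by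
  intro kw
  induction kw with
  | nil => simp
  | cons w kw ih =>
    intro b
    have hstep : (if c w = true then false else b) = (b && !c w) := by
      cases hc : c w <;> simp
    rw [List.foldl_cons, hstep, ih, List.all_cons, Bool.and_assoc]

theorem pvA_andFlag_eq (kw : List String) (p : String) :
    pvA_andFlag kw p = kw.all (fun w => pvWordIn w p) := by
  simpa [pvA_andFlag] using pvFoldFlagAnd (fun w => pvWordIn w p) kw true

theorem pvA_notFlag_eq (kw : List String) (p : String) :
    pvA_notFlag kw p = kw.all (fun w => !pvPadIn w p) := by
  simpa [pvA_notFlag] using pvFoldFlagNot (fun w => pvPadIn w p) kw true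

theorem pvSel_mem (tc : List String) : ∀ (L s : List String) (q : String),
    q ∈ pvSel tc s L ↔ q ∈ L ∧ pvB_choose tc q = true ∧ q ∉ s := by
  intro L
  induction L with
  | nil => simp [pvSel]
  | cons p L ih =>
    intro s q
    simp only [pvSel]
    by_cases hp : p ∈ s
    · rw [if_pos hp, ih]
      constructor
      · rintro ⟨h1, h2, h3⟩; exact ⟨List.mem_cons_of_mem _ h1, h2, h3⟩
      · rintro ⟨h1, h2, h3⟩
        rcases List.mem_cons.mp h1 with rfl | h1'
        · exact absurd hp h3
        · exact ⟨h1', h2, h3⟩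
    · rw [if_neg hp]
      by_cases hm : pvB_choose tc p = true
      · rw [if_pos hm, List.mem_cons, ih]
        constructor
        · rintro (rfl | ⟨h1, h2, h3⟩)
          · exact ⟨List.mem_cons_self, hm, hp⟩
          · exact ⟨List.mem_cons_of_mem _ h1, h2,
              fun hq => h3 (List.mem_append.mpr (Or.inl hq))⟩
        · rintro ⟨h1, h2, h3⟩
          by_cases hqp : q = p
          · exact Or.inl hqp
          · rcases List.mem_cons.mp h1 with rfl | h1'
            · exact absurd rfl hqp
            · refine Or.inr ⟨h1', h2, fun hq => ?_⟩
              rcases List.mem_append.mp hq with h | h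
              · exact h3 h
              · exact hqp (by simpa using h)
      · rw [if_neg hm, ih]
        constructor
        · rintro ⟨h1, h2, h3⟩; exact ⟨List.mem_cons_of_mem _ h1, h2, h3⟩
        · rintro ⟨h1, h2, h3⟩
          rcases List.mem_cons.mp h1 with rfl | h1'
          · exact absurd h2 hm
          · exact ⟨h1', h2, h3⟩

theorem pvSel_nodup (tc : List String) : ∀ (L s : List String), (pvSel tc s L).Nodup := by
  intro L
  induction L with
  | nil => intro s; simp [pvSel]
  | cons p L ih =>
    intro s
    simp only [pvSel]
    by_cases hp : p ∈ s
    · rw [if_pos hp]; exact ih s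
    · rw [if_neg hp]
      by_cases hm : pvB_choose tc p = true
      · rw [if_pos hm, List.nodup_cons]
        refine ⟨fun hmem => ?_, ih _⟩
        have := (pvSel_mem tc L (s ++ [p]) p).mp hmem
        simp at this
      · rw [if_neg hm]; exact ih s

theorem pvSel_pairwise (tc : List String) (P : List String) :
    ∀ (L pre s : List String), P = pre ++ L → (∀ p ∈ pre, pvB_choose tc p = true → p ∈ s) →
    (pvSel tc s L).Pairwise (fun a b => P.idxOf a < P.idxOf b) := by
  intro L
  induction L with
  | nil => intro pre s _ _; simp [pvSel]
  | cons p L ih =>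
    intro pre s hP hpre
    have hP' : P = (pre ++ [p]) ++ L := by simp [hP]
    simp only [pvSel]
    by_cases hp : p ∈ s
    · rw [if_pos hp]
      exact ih (pre ++ [p]) s hP' (by
        intro x hx hmx
        rcases List.mem_append.mp hx with h | h
        · exact hpre x h hmx
        · simp only [List.mem_singleton] at h; exact h ▸ hp)
    · rw [if_neg hp]
      by_cases hm : pvB_choose tc p = true
      · rw [if_pos hm]
        have hpnotpre : p ∉ pre := fun hmem => hp (hpre p hmem hm)
        have hidxp : P.idxOf p = pre.length := by
          rw [hP, List.idxOf_append, if_neg hpnotpre]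
          simp [List.idxOf_cons_self]
        refine List.Pairwise.cons (fun q hq => ?_) ?_
        · obtain ⟨hqL, hmq, hqs⟩ := (pvSel_mem tc L (s ++ [p]) q).mp hq
          have hqnot : q ∉ pre ++ [p] := by
            intro hmem
            rcases List.mem_append.mp hmem with h | h
            · exact hqs (List.mem_append.mpr (Or.inl (hpre q h hmq)))
            · exact hqs (List.mem_append.mpr (Or.inr h))
          have hgt : P.idxOf q = L.idxOf q + (pre ++ [p]).length := by
            rw [hP', List.idxOf_append, if_neg hqnot]
          rw [hidxp, hgt, List.length_append, List.length_singleton]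
          omega
        · exact ih (pre ++ [p]) (s ++ [p]) hP' (by
            intro x hx hmx
            rcases List.mem_append.mp hx with h | h
            · exact List.mem_append.mpr (Or.inl (hpre x h hmx))
            · exact List.mem_append.mpr (Or.inr h))
      · rw [if_neg hm]
        exact ih (pre ++ [p]) s hP' (by
          intro x hx hmx
          rcases List.mem_append.mp hx with h | h
          · exact hpre x h hmx
          · simp only [List.mem_singleton] at h; subst h; exact absurd hmx hm)

theorem pvB_fold_eq (tc : List String) : ∀ (L : List String) (s : PySem.Set String) (out : List String),
    (L.foldl (fun (st : PySem.Set String × List String) p =>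
        if PySem.Set.contains st.1 p then st
        else if pvB_choose tc p then (PySem.Set.add st.1 p, st.2 ++ [p]) else st) (s, out)).2
      = out ++ pvSel tc s L := by
  intro L
  induction L with
  | nil => intro s out; simp [pvSel]
  | cons p L ih =>
    intro s out
    simp only [List.foldl_cons]
    by_cases hp : p ∈ s
    · have hc : PySem.Set.contains s p = true := (PySem.Set.contains_iff s p).mpr hp
      rw [if_pos hc, ih]
      simp only [pvSel]; rw [if_pos hp]
    · have hc : PySem.Set.contains s p = false := by
        rw [Bool.eq_false_iff]
        intro h; exact hp ((PySem.Set.contains_iff s p).mp h)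
      rw [hc, if_neg (by simp)]
      by_cases hm : pvB_choose tc p = true
      · have hadd : PySem.Set.add s p = s ++ [p] := by
          simp [PySem.Set.add, PySem.Set.contains] at hc ⊢
          intro h; exact absurd h hc
        rw [if_pos hm, hadd, ih]
        simp only [pvSel]; rw [if_neg hp, if_pos hm]
        simp
      · rw [if_neg hm, ih]
        simp only [pvSel]; rw [if_neg hp, if_neg hm]

-- (index? P p).getD 0 is idxOf for members
theorem pvIdx_eq (P : List String) (p : String) (h : p ∈ P) :
    (PySem.List.index? P p).getD 0 = P.idxOf p := by
  rw [PySem.List.index?_eq_idxOf?]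
  cases hidx : List.idxOf? p P with
  | none => exact absurd h (List.idxOf?_eq_none_iff.mp hidx)
  | some k => simp [List.idxOf_eq_getD_idxOf?, hidx]

-- sorted(set(zs), key=fst) of a nodup, strictly fst-increasing list is the list itself
theorem pvSortedOfListSelf (zs : List (Nat × String)) (h1 : zs.Nodup)
    (h2 : zs.Pairwise (fun a b => a.1 < b.1)) :
    PySem.List.sorted (PySem.Set.ofList zs) (fun t => t.1) = zs := by
  apply PySem.List.sorted_eq_of_perm_of_pairwise_lt _ _ _ _ h2
  have hself : PySem.Set.ofList zs = zs := by
    have := PySem.Set.update_eq_append_of_disjoint ([] : PySem.Set (Nat × String)) zs h1 (by simp)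
    simpa [PySem.Set.update, PySem.Set.ofList] using this
  rw [hself]

-- A's AND stage equals B's single pass (as (first-index, text) pairs)
theorem pvA_stage1 (tc : List String) (P : List String) :
    PySem.List.sorted (PySem.Set.ofList (tc.foldl (fun acc key_words =>
        P.foldl (fun acc2 pragrab =>
          if pvA_andFlag (pvSplit key_words ",") pragrab then
            acc2 ++ [((PySem.List.index? P pragrab).getD 0, pragrab)]
          else acc2) acc) [])) (fun t => t.1)
      = (pvSel tc [] P).map (fun p => (P.idxOf p, p)) := by
  have hstep : (fun (acc : List (Nat × String)) key_words =>
      P.foldl (fun acc2 pragrab =>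
        if pvA_andFlag (pvSplit key_words ",") pragrab then
          acc2 ++ [((PySem.List.index? P pragrab).getD 0, pragrab)]
        else acc2) acc)
      = (fun acc g => acc ++ (P.filter (fun p => pvA_andFlag (pvSplit g ",") p)).map
          (fun p => ((PySem.List.index? P p).getD 0, p))) := by
    funext acc g
    exact PySem.List.foldl_append_if _ _ P acc
  rw [hstep, PySem.List.foldl_append_eq_flatMap]
  apply PySem.List.sorted_eq_of_perm_of_pairwise_lt
  · apply List.perm_of_nodup_nodup_toFinset_eq
    · exact List.Nodup.map (fun a b h => congrArg Prod.snd h) (pvSel_nodup tc P [])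
    · exact PySem.Set.nodup_ofList _
    · ext t
      simp only [List.mem_toFinset, PySem.Set.mem_ofList, List.nil_append, List.mem_flatMap,
        List.mem_map, List.mem_filter]
      constructor
      · rintro ⟨p, hpsel, rfl⟩
        obtain ⟨hpP, hmp, -⟩ := (pvSel_mem tc P [] p).mp hpsel
        obtain ⟨g, hg, hgp⟩ := List.any_eq_true.mp hmp
        refine ⟨g, hg, p, ⟨hpP, ?_⟩, by rw [pvIdx_eq P p hpP]⟩
        rw [pvA_andFlag_eq]; exact hgp
      · rintro ⟨g, hg, p, ⟨hpP, hflag⟩, rfl⟩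
        refine ⟨p, (pvSel_mem tc P [] p).mpr ⟨hpP, ?_, List.not_mem_nil⟩, by rw [pvIdx_eq P p hpP]⟩
        exact List.any_eq_true.mpr ⟨g, hg, by rw [pvA_andFlag_eq] at hflag; exact hflag⟩
  · rw [List.pairwise_map]
    exact pvSel_pairwise tc P P [] [] rfl (by simp)

-- enumerate helper for A's else branch
def pvEnum (k : Nat) : List String → List (Nat × String)
  | [] => []
  | p :: L => (k, p) :: pvEnum (k + 1) L

theorem pvEnum_fold : ∀ (L : List String) (acc : List (Nat × String)) (k : Nat),
    (L.foldl (fun (st : List (Nat × String) × Nat) pragrab =>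
      (st.1 ++ [(st.2, pragrab)], st.2 + 1)) (acc, k)).1 = acc ++ pvEnum k L := by
  intro L
  induction L with
  | nil => intro acc k; simp [pvEnum]
  | cons p L ih => intro acc k; simp [List.foldl_cons, ih, pvEnum]

theorem pvEnum_fst_ge (k : Nat) : ∀ (L : List String) (t : Nat × String), t ∈ pvEnum k L → k ≤ t.1 := by
  intro L
  induction L generalizing k with
  | nil => intro t h; simp [pvEnum] at h
  | cons p L ih =>
    intro t ht
    rcases List.mem_cons.mp ht with rfl | h
    · simp
    · exact Nat.le_of_succ_le (ih (k + 1) t h)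

theorem pvEnum_pairwise (k : Nat) : ∀ (L : List String), (pvEnum k L).Pairwise (fun a b => a.1 < b.1) := by
  intro L
  induction L generalizing k with
  | nil => simp [pvEnum]
  | cons p L ih =>
    refine List.Pairwise.cons (fun t ht => ?_) (ih (k + 1))
    exact Nat.lt_of_lt_of_le (Nat.lt_succ_self k) (pvEnum_fst_ge (k + 1) L t ht)

theorem pvEnum_nodup (k : Nat) (L : List String) : (pvEnum k L).Nodup :=
  (pvEnum_pairwise k L).imp (fun h => by intro he; rw [he] at h; exact lt_irrefl _ h)

theorem pvEnum_snd (k : Nat) : ∀ (L : List String), (pvEnum k L).map (fun t => t.2) = L := by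
  intro L
  induction L generalizing k with
  | nil => simp [pvEnum]
  | cons p L ih => simp [pvEnum, ih]

-- A's NOT stage is one filter over any nodup, strictly fst-increasing pair list
theorem pvA_stage2 (tn : List String) (zs : List (Nat × String)) (h1 : zs.Nodup)
    (h2 : zs.Pairwise (fun a b => a.1 < b.1)) :
    PySem.List.sorted (PySem.Set.ofList (tn.foldl (fun acc key_words =>
        zs.foldl (fun acc2 pragrab =>
          if pvA_notFlag (pvSplit key_words ",") pragrab.2 then acc2 ++ [pragrab] else acc2) acc) []))
        (fun t => t.1)
      = zs.filter (fun t => pvB_notKeep tn t.2) := by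
  have hstep : (fun (acc : List (Nat × String)) key_words =>
      zs.foldl (fun acc2 pragrab =>
        if pvA_notFlag (pvSplit key_words ",") pragrab.2 then acc2 ++ [pragrab] else acc2) acc)
      = (fun acc g => acc ++ zs.filter (fun t => pvA_notFlag (pvSplit g ",") t.2)) := by
    funext acc g
    exact PySem.List.foldl_append_if_eq_filter _ zs acc
  rw [hstep, PySem.List.foldl_append_eq_flatMap]
  apply PySem.List.sorted_eq_of_perm_of_pairwise_lt
  · apply List.perm_of_nodup_nodup_toFinset_eq
    · exact List.Nodup.filter _ h1
    · exact PySem.Set.nodup_ofList _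
    · ext t
      simp only [List.mem_toFinset, PySem.Set.mem_ofList, List.nil_append, List.mem_flatMap,
        List.mem_filter, pvB_notKeep, List.any_eq_true, pvA_notFlag_eq]
      tauto
  · exact h2.filter _

-- final projection loop is map snd
theorem pvSnd_fold (zs : List (Nat × String)) :
    zs.foldl (fun acc t => acc ++ [t.2]) [] = zs.map (fun t => t.2) := by
  simpa using PySem.List.foldl_append_singleton_eq_map (fun t : Nat × String => t.2) zs []

-- ===== VERDICT (by name: the statement is the Claim_ definition above) =====
theorem get_raw_text_by_topic_spec : Claim_equal_get_raw_text_by_topic := by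
  intro topics raw_text _ hpre
  unfold Pre_get_raw_text_by_topic at hpre
  unfold Spec_get_raw_text_by_topic
  match topics with
  | t0 :: t1 :: rest =>
  have hget0 : PySem.List.pyGet? (t0 :: t1 :: rest) (0 : Int) = some t0 := by simp [pysem]
  have hget1 : PySem.List.pyGet? (t0 :: t1 :: rest) (1 : Int) = some t1 := by simp [pysem]
  simp only [get_raw_text_by_topic, get_raw_text_by_topic_alt, hget0, hget1, Option.bind_some, Option.map_some, Option.getD_some]
  set P := pvSplit raw_text "\n" with hP
  by_cases hc : t0 = []
  · rw [if_neg (show ¬(t0.length ≠ 0) by simp [hc]), if_neg (show ¬(t0 ≠ []) by simp [hc])]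
    rw [pvEnum_fold P [] 0, List.nil_append,
        pvSortedOfListSelf _ (pvEnum_nodup 0 P) (pvEnum_pairwise 0 P)]
    by_cases hn : t1 = []
    · rw [if_neg (show ¬(t1.length ≠ 0) by simp [hn]), if_neg (show ¬(t1 ≠ []) by simp [hn])]
      rw [pvSortedOfListSelf _ (pvEnum_nodup 0 P) (pvEnum_pairwise 0 P), pvSnd_fold, pvEnum_snd]
    · rw [if_pos (show t1.length ≠ 0 by simp [hn]), if_pos (show t1 ≠ [] from hn)]
      rw [pvA_stage2 t1 _ (pvEnum_nodup 0 P) (pvEnum_pairwise 0 P), pvSnd_fold]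
      rw [show (fun t : Nat × String => pvB_notKeep t1 t.2)
            = ((fun p => pvB_notKeep t1 p) ∘ (fun t : Nat × String => t.2)) from rfl,
          ← List.filter_map, pvEnum_snd]
  · rw [if_pos (show t0.length ≠ 0 by simp [hc]), if_pos (show t0 ≠ [] from hc)]
    rw [pvA_stage1 t0 P, pvB_fold_eq t0 P PySem.Set.empty [], List.nil_append]
    have hnd : ((pvSel t0 [] P).map (fun p => (List.idxOf p P, p))).Nodup :=
      List.Nodup.map (fun a b h => congrArg Prod.snd h) (pvSel_nodup t0 P [])
    have hpw : ((pvSel t0 [] P).map (fun p => (List.idxOf p P, p))).Pairwise (fun a b => a.1 < b.1) := by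
      rw [List.pairwise_map]
      exact pvSel_pairwise t0 P P [] [] rfl (by simp)
    by_cases hn : t1 = []
    · rw [if_neg (show ¬(t1.length ≠ 0) by simp [hn]), if_neg (show ¬(t1 ≠ []) by simp [hn])]
      rw [pvSortedOfListSelf _ hnd hpw, pvSnd_fold, List.map_map,
          show ((fun t : Nat × String => t.2) ∘ fun p : String => (List.idxOf p P, p)) = id from rfl,
          List.map_id]
      rfl
    · rw [if_pos (show t1.length ≠ 0 by simp [hn]), if_pos (show t1 ≠ [] from hn)]
      rw [pvA_stage2 t1 _ hnd hpw, pvSnd_fold, List.filter_map, List.map_map,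
          show ((fun t : Nat × String => pvB_notKeep t1 t.2) ∘ fun p : String => (List.idxOf p P, p))
            = (fun p => pvB_notKeep t1 p) from rfl,
          show ((fun t : Nat × String => t.2) ∘ fun p : String => (List.idxOf p P, p)) = id from rfl,
          List.map_id]
      rfl
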